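-- pv_equiv track=rewrite | github.com/zenml-io/zenml | src/zenml/utils/package_utils.py | clean_requirements
-- ===== SOURCE A (Python) =====
-- from typing import Dict, List, Optional, Union, cast
--
-- def clean_requirements(requirements: List[str]) -> List[str]:
--     """Clean requirements list from redundant requirements.
--
--     Args:
--         requirements: List of requirements.
--
--     Returns:
--         Cleaned list of requirements
--
--     Raises:
--         TypeError: If input is not a list
--         ValueError: If any element in the list is not a string
--     """
--     if not isinstance(requirements, list):
--         raise TypeError("Input must be a list")
--
--     if not all(isinstance(req, str) for req in requirements):
--         raise ValueError("All elements in the list must be strings")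
--
--     cleaned = {}
--     for req in requirements:
--         package = (
--             req.split(">=")[0]
--             .split("==")[0]
--             .split("<")[0]
--             .split("~=")[0]
--             .split("^=")[0]
--             .split("[")[0]
--             .strip()
--         )
--         if package not in cleaned or any(
--             op in req for op in ["=", ">", "<", "~", "^"]
--         ):
--             cleaned[package] = req
--     return sorted(cleaned.values())
-- ===== SOURCE B (Python) =====
-- def _package_name(req):
--     return (
--         req.split(">=")[0]
--         .split("==")[0]
--         .split("<")[0]
--         .split("~=")[0]
--         .split("^=")[0]
--         .split("[")[0]
--         .strip()
--     )
--
--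
-- def _has_op(req):
--     return any(op in req for op in ["=", ">", "<", "~", "^"])
--
--
-- def clean_requirements(requirements):
--     if not isinstance(requirements, list):
--         raise TypeError("Input must be a list")
--
--     if not all(isinstance(req, str) for req in requirements):
--         raise ValueError("All elements in the list must be strings")
--
--     # Phase 1: group the original requirement strings by package name,
--     # in encounter order.
--     groups = {}
--     for req in requirements:
--         groups.setdefault(_package_name(req), []).append(req)
--
--     # Phase 2: reduce each group to its representative: the last entry
--     # carrying a version operator, else the first entry of the group.
--     reps = []
--     for reqs in groups.values():
--         rep = reqs[0]
--         for r in reqs: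
--             if _has_op(r):
--                 rep = r
--         reps.append(rep)
--
--     return sorted(reps)
-- ===== Notes on version B (the rewrite author's own statement) =====
-- stated objective: alternative
-- what changed: Replaces A's single dict-with-conditional-overwrite pass by two explicit phases: one pass grouping requirements into name -> list of originals, then a reduction picking each group's representative (last entry with a version operator, else the first).
import Mathlib
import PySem

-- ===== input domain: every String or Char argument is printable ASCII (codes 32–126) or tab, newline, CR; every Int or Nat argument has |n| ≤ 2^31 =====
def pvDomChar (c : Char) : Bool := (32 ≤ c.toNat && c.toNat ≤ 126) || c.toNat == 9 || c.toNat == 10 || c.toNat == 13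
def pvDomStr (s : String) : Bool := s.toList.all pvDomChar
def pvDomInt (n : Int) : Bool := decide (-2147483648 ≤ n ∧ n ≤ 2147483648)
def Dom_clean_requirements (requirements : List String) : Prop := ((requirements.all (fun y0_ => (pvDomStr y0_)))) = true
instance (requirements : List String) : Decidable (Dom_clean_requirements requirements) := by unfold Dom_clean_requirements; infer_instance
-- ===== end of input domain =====

-- B re-implements A's dedupe-and-sort in two explicit phases (group by package name, then
-- reduce each group to its representative); same cost, different decomposition.
-- Both Pythons' isinstance validation is vacuous under the Lean typing and is not ported.

-- ===== PORT A =====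
-- s.split(sep)[0]; every sep used is a nonempty literal, so split? is some and the
-- split list is nonempty, so the [0] access never raises
def pvSplit0 (s sep : String) : String :=
  ((PySem.Str.split? s sep).getD []).headD ""

-- package = req.split(">=")[0].split("==")[0].split("<")[0].split("~=")[0].split("^=")[0].split("[")[0].strip()
def pvPkg (req : String) : String :=
  PySem.Str.strip
    (pvSplit0 (pvSplit0 (pvSplit0 (pvSplit0 (pvSplit0 (pvSplit0 req ">=") "==") "<") "~=") "^=") "[")

-- any(op in req for op in ["=", ">", "<", "~", "^"])
def pvHasOp (req : String) : Bool :=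
  ["=", ">", "<", "~", "^"].any (fun op => PySem.Str.isIn op req)

def clean_requirements (requirements : List String) : List String :=
  let cleaned : PySem.Dict String String :=
    requirements.foldl
      (fun cleaned req =>
        let package := pvPkg req
        if !cleaned.contains package || pvHasOp req then cleaned.insert package req
        else cleaned)
      PySem.Dict.empty
  PySem.List.sorted cleaned.values (fun x => x) false

-- ===== PORT B =====
-- the inner reduction loop of Source B: rep = reqs[0]; for r in reqs: if _has_op(r): rep = r
-- (group lists are nonempty, so reqs[0] never raises; headD "" is that access)
def pvRep (reqs : List String) : String :=
  reqs.foldl (fun rep r => if pvHasOp r then r else rep) (reqs.headD "")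

def clean_requirements_alt (requirements : List String) : List String :=
  let groups : PySem.Dict String (List String) :=
    requirements.foldl
      (fun groups req => groups.modify (pvPkg req) [] (fun l => l ++ [req]))
      PySem.Dict.empty
  PySem.List.sorted (groups.values.map pvRep) (fun x => x) false

-- ===== PRECONDITION & SPEC =====
def Spec_clean_requirements (requirements : List String) (out : List String) : Prop := out = clean_requirements_alt requirements
instance (requirements : List String) (out : List String) : Decidable (Spec_clean_requirements requirements out) := by unfold Spec_clean_requirements; infer_instance

-- ===== CLAIM (what is proved, stated in full; the proofs are below) =====
def Claim_equal_clean_requirements : Prop := ∀ (requirements : List String), Dom_clean_requirements requirements → Spec_clean_requirements requirements (clean_requirements requirements)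

-- ===== LEMMAS AND PROOFS =====

theorem pvRep_single (r : String) : pvRep [r] = r := by
  simp [pvRep]

theorem pvRep_append_op (l : List String) (r : String) (h : pvHasOp r = true) :
    pvRep (l ++ [r]) = r := by
  cases l <;> simp [pvRep, List.foldl_append, h]

theorem pvRep_append_noop (l : List String) (r : String) (h : pvHasOp r = false)
    (hl : l ≠ []) : pvRep (l ++ [r]) = pvRep l := by
  cases l with
  | nil => exact absurd rfl hl
  | cons a t => simp [pvRep, List.foldl_append, h]

-- if A's dict is the entrywise pvRep-image of B's groups dict, both contain the same keys
theorem contains_of_items_map (dA : PySem.Dict String String)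
    (dB : PySem.Dict String (List String))
    (h : dA.items = dB.items.map (fun p => (p.1, pvRep p.2))) (k : String) :
    dA.contains k = dB.contains k := by
  simp only [PySem.Dict.contains, h, List.any_map]
  rfl

-- the loop invariant: A's dict stays the entrywise pvRep-image of B's groups dict
theorem main_inv (reqs : List String) :
    ∀ (dA : PySem.Dict String String) (dB : PySem.Dict String (List String)),
    dB.keys.Nodup →
    dA.items = dB.items.map (fun p => (p.1, pvRep p.2)) →
    (∀ p ∈ dB.items, p.2 ≠ []) →
    (reqs.foldl
      (fun cleaned req =>
        let package := pvPkg req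
        if !cleaned.contains package || pvHasOp req then cleaned.insert package req
        else cleaned) dA).items
    = (reqs.foldl
        (fun groups req => groups.modify (pvPkg req) [] (fun l => l ++ [req])) dB).items.map
        (fun p => (p.1, pvRep p.2)) := by
  induction reqs with
  | nil => intro dA dB _ hmap _; simpa using hmap
  | cons r rs ih =>
    intro dA dB hnd hmap hne
    simp only [List.foldl_cons]
    have hc : dA.contains (pvPkg r) = dB.contains (pvPkg r) :=
      contains_of_items_map dA dB hmap (pvPkg r)
    have hmod : dB.modify (pvPkg r) [] (fun l => l ++ [r])
        = dB.insert (pvPkg r) (dB.getD (pvPkg r) [] ++ [r]) := rfl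
    have hnd' : (dB.modify (pvPkg r) [] (fun l => l ++ [r])).keys.Nodup := by
      rw [hmod]; exact PySem.Dict.nodup_keys_insert _ _ _ hnd
    have hne' : ∀ q ∈ (dB.modify (pvPkg r) [] (fun l => l ++ [r])).items, q.2 ≠ [] := by
      intro q hq
      rw [hmod] at hq
      rcases (PySem.Dict.mem_items_insert _ _ _ _).1 hq with h1 | ⟨h2, _⟩
      · subst h1; simp
      · exact hne q h2
    cases hB : dB.contains (pvPkg r) with
    | false =>
      have hstepA : (if !dA.contains (pvPkg r) || pvHasOp r then dA.insert (pvPkg r) r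
          else dA) = dA.insert (pvPkg r) r := by
        rw [hc, hB]; simp
      rw [hstepA]
      refine ih _ _ hnd' ?_ hne'
      rw [PySem.Dict.items_insert_of_not_contains dA r (hc.trans hB), hmod,
          PySem.Dict.items_insert_of_not_contains dB _ hB,
          PySem.Dict.getD_of_not_contains dB _ hB]
      simp [hmap, pvRep_single]
    | true =>
      by_cases hop : pvHasOp r = true
      · have hstepA : (if !dA.contains (pvPkg r) || pvHasOp r then dA.insert (pvPkg r) r
            else dA) = dA.insert (pvPkg r) r := by
          rw [hop]; simp
        rw [hstepA]
        refine ih _ _ hnd' ?_ hne'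
        rw [PySem.Dict.items_insert_of_contains dA r (hc.trans hB), hmod,
            PySem.Dict.items_insert_of_contains dB _ hB,
            hmap, List.map_map, List.map_map]
        apply List.map_congr_left
        intro q hq
        by_cases hqp : q.1 = pvPkg r
        · simp [Function.comp, hqp, pvRep_append_op _ _ hop]
        · simp [Function.comp, hqp]
      · have hstepA : (if !dA.contains (pvPkg r) || pvHasOp r then dA.insert (pvPkg r) r
            else dA) = dA := by
          rw [hc, hB, eq_false_of_ne_true hop]; simp
        rw [hstepA]
        refine ih _ _ hnd' ?_ hne'
        rw [hmod, PySem.Dict.items_insert_of_contains dB _ hB, List.map_map, hmap]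
        apply List.map_congr_left
        intro q hq
        by_cases hqp : q.1 = pvPkg r
        · have hget : dB.getD (pvPkg r) [] = q.2 := by
            rw [← hqp]
            exact PySem.Dict.getD_of_mem_items dB (by rw [Prod.mk.eta]; exact hq) hnd []
          simp [Function.comp, hqp, hget,
                pvRep_append_noop _ _ (eq_false_of_ne_true hop) (hne q hq)]
        · simp [Function.comp, hqp]

-- ===== VERDICT (by name: the statement is the Claim_ definition above) =====
theorem clean_requirements_spec : Claim_equal_clean_requirements := by
  intro reqs _
  unfold Spec_clean_requirements clean_requirements clean_requirements_alt
  have h := main_inv reqs PySem.Dict.empty PySem.Dict.empty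
    (by simp [PySem.Dict.keys_empty]) rfl
    (by intro p hp; simp [PySem.Dict.empty] at hp)
  simp only [PySem.Dict.values, h, List.map_map]
  rfl
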